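-- pv_equiv track=rewrite | github.com/danilop/semstash | src/semstash/utils.py | generate_breadcrumbs
-- ===== SOURCE A (Python) =====
-- def normalize_path(path: str) -> str:
--     """Normalize path to have leading / and handle edge cases.
--
--     Ensures consistent path format for user-facing paths.
--
--     Args:
--         path: Input path string.
--
--     Returns:
--         Normalized path with leading /.
--
--     Examples:
--         >>> normalize_path('docs/file.txt')
--         '/docs/file.txt'
--         >>> normalize_path('/docs/file.txt')
--         '/docs/file.txt'
--         >>> normalize_path('/')
--         '/'
--         >>> normalize_path('')
--         '/'
--     """
--     if not path or path == "/":
--         return "/"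
--
--     # Ensure leading /
--     if not path.startswith("/"):
--         path = "/" + path
--
--     return path
--
-- def generate_breadcrumbs(path: str) -> list[tuple[str, str]]:
--     """Generate breadcrumb navigation for a path.
--
--     Args:
--         path: Current path like '/docs/subdir/' or '/docs/file.txt'.
--
--     Returns:
--         List of (name, path) tuples for breadcrumb links.
--
--     Examples:
--         >>> generate_breadcrumbs('/')
--         [('/', '/')]
--         >>> generate_breadcrumbs('/docs/')
--         [('/', '/'), ('docs', '/docs/')]
--         >>> generate_breadcrumbs('/docs/subdir/')
--         [('/', '/'), ('docs', '/docs/'), ('subdir', '/docs/subdir/')]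
--         >>> generate_breadcrumbs('/docs/file.txt')
--         [('/', '/'), ('docs', '/docs/'), ('file.txt', '/docs/file.txt')]
--     """
--     path = normalize_path(path)
--     if path == "/":
--         return [("/", "/")]
--
--     parts = path.strip("/").split("/")
--     breadcrumbs: list[tuple[str, str]] = [("/", "/")]
--
--     current = ""
--     for i, part in enumerate(parts):
--         current += f"/{part}"
--         # Add trailing / for directories (all except possibly the last part)
--         is_last = i == len(parts) - 1
--         is_folder = path.endswith("/") or not is_last
--         display_path = current + "/" if is_folder and not current.endswith("/") else current
--         breadcrumbs.append((part, display_path))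
--
--     return breadcrumbs
-- ===== SOURCE B (Python) =====
-- def generate_breadcrumbs(path: str) -> list[tuple[str, str]]:
--     """Two-phase rewrite: build all cumulative prefix paths first, then pair them
--     with the part names in a single comprehension."""
--     if not path or path == "/":
--         return [("/", "/")]
--     if not path.startswith("/"):
--         path = "/" + path
--     parts = path.strip("/").split("/")
--     n = len(parts)
--     ends = path.endswith("/")
--     prefixes = ["/" + "/".join(parts[: i + 1]) for i in range(n)]
--     return [("/", "/")] + [
--         (part, pre + "/" if (ends or i < n - 1) and not pre.endswith("/") else pre)
--         for i, (part, pre) in enumerate(zip(parts, prefixes))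
--     ]
-- ===== Notes on version B (the rewrite author's own statement) =====
-- stated objective: alternative
-- what changed: Replaces A's single stateful loop that grows a `current` accumulator string with a two-phase form: first build every cumulative prefix path by joining the leading slice of parts, then pair part names with prefixes in one comprehension over enumerate(zip(parts, prefixes)).
import Mathlib
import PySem

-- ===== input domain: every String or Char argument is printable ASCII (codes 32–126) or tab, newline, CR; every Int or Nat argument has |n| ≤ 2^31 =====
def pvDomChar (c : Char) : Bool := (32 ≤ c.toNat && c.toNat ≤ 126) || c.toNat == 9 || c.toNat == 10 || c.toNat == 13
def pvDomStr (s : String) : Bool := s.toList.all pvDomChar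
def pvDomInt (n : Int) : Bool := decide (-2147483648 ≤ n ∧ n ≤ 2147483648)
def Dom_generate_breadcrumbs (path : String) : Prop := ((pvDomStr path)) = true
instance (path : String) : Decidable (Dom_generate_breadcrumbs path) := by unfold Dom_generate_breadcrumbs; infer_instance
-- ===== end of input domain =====

-- B replaces A's stateful accumulator loop with a two-phase form (build all cumulative
-- prefixes via join, then one pass pairing names with prefixes); same cost, alternative structure.

-- ===== PORT A =====
-- A's for-loop over enumerate(parts) with the growing `current` accumulator.
def pvBuildA (p : List Char) (n : Nat) :
    List (Int × List Char) → List Char → List (String × String) → List (String × String)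
  | [], _, acc => acc
  | (i, part) :: rest, cur, acc =>
      let cur' := cur ++ '/' :: part
      let isLast := i == (n : Int) - 1
      let isFolder := PySem.Chars.endswith p ['/'] || !isLast
      let disp := if isFolder && !(PySem.Chars.endswith cur' ['/']) then cur' ++ ['/'] else cur'
      pvBuildA p n rest cur' (acc ++ [(String.ofList part, String.ofList disp)])

def generate_breadcrumbs (path : String) : List (String × String) :=
  let p0 := path.toList
  -- normalize_path inlined: "" or "/" ↦ "/", else ensure leading "/"
  let p := if p0 = [] ∨ p0 = ['/'] then ['/']
           else if PySem.Chars.startswith p0 ['/'] then p0 else '/' :: p0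
  if p = ['/'] then [("/", "/")]
  else
    let parts := PySem.Chars.splitOn (PySem.Chars.stripChars p ['/']) ['/']
    pvBuildA p parts.length (PySem.List.enumerate parts 0) [] [("/", "/")]

-- ===== PORT B =====
def generate_breadcrumbs_alt (path : String) : List (String × String) :=
  let cs := path.toList
  if cs = [] ∨ cs = ['/'] then [("/", "/")]
  else
    let p := if PySem.Chars.startswith cs ['/'] then cs else '/' :: cs
    let parts := PySem.Chars.splitOn (PySem.Chars.stripChars p ['/']) ['/']
    let n := parts.length
    let ends := PySem.Chars.endswith p ['/']
    let prefixes := (List.range n).map (fun i => '/' :: PySem.Chars.join ['/'] (parts.take (i + 1)))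
    ("/", "/") ::
      (PySem.List.enumerate (parts.zip prefixes) 0).map (fun e =>
        let disp := if (ends || decide (e.1 < (n : Int) - 1)) && !(PySem.Chars.endswith e.2.2 ['/'])
                    then e.2.2 ++ ['/'] else e.2.2
        (String.ofList e.2.1, String.ofList disp))

-- ===== PRECONDITION & SPEC =====
def Spec_generate_breadcrumbs (path : String) (out : List (String × String)) : Prop := out = generate_breadcrumbs_alt path
instance (path : String) (out : List (String × String)) : Decidable (Spec_generate_breadcrumbs path out) := by unfold Spec_generate_breadcrumbs; infer_instance

-- ===== CLAIM (what is proved, stated in full; the proofs are below) =====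
def Claim_equal_generate_breadcrumbs : Prop := ∀ (path : String), Dom_generate_breadcrumbs path → Spec_generate_breadcrumbs path (generate_breadcrumbs path)

-- ===== LEMMAS AND PROOFS =====

-- the breadcrumb entry both programs emit at index i with display-path base `pre`
def pvEntry (p : List Char) (n : Nat) (i : Int) (pre part : List Char) : String × String :=
  (String.ofList part,
   String.ofList (if (PySem.Chars.endswith p ['/'] || !(i == (n : Int) - 1)) &&
                 !(PySem.Chars.endswith pre ['/']) then pre ++ ['/'] else pre))

-- the tail of the breadcrumb list, as a direct recursion (common form of both ports)
def pvTail (p : List Char) (n : Nat) : List (List Char) → Int → List Char → List (String × String)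
  | [], _, _ => []
  | part :: rest, j, cur =>
      pvEntry p n j (cur ++ '/' :: part) part :: pvTail p n rest (j + 1) (cur ++ '/' :: part)

-- the `current` accumulator value before index k
def pvPref (P : List (List Char)) : Nat → List Char
  | 0 => []
  | k + 1 => '/' :: PySem.Chars.join ['/'] (P.take (k + 1))

theorem pvJoin_append_singleton (xs : List (List Char)) (y : List Char) :
    PySem.Chars.join ['/'] (xs ++ [y]) =
      (if xs = [] then y else PySem.Chars.join ['/'] xs ++ '/' :: y) := by
  induction xs with
  | nil => simp [PySem.Chars.join_singleton]
  | cons a t ih =>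
      cases t with
      | nil => simp [PySem.Chars.join_cons_cons, PySem.Chars.join_singleton]
      | cons b t' =>
          rw [if_neg (by simp)] at ih
          simp only [List.cons_append] at ih ⊢
          rw [PySem.Chars.join_cons_cons, ih, if_neg (by simp), PySem.Chars.join_cons_cons]
          simp

-- the range-built prefix at index k is the accumulator before k plus "/" ++ P[k]
theorem pvPrefix_eq (P : List (List Char)) (k : Nat) (hk : k < P.length) :
    '/' :: PySem.Chars.join ['/'] (P.take (k + 1)) = pvPref P k ++ '/' :: P[k] := by
  have ht : P.take (k + 1) = P.take k ++ [P[k]] := by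
    rw [List.take_add_one]
    simp [List.getElem?_eq_getElem hk]
  rw [ht, pvJoin_append_singleton]
  cases k with
  | zero => simp [pvPref]
  | succ m =>
      have hPne : P ≠ [] := by intro h; subst h; simp at hk
      have : P.take (m + 1) ≠ [] := by simp [List.take_eq_nil_iff, hPne]
      simp [pvPref, this]

-- A's loop equals the common recursion
theorem pvBuildA_eq_tail (p : List Char) (n : Nat) (rest : List (List Char)) :
    ∀ (j : Int) (cur : List Char) (acc : List (String × String)),
      pvBuildA p n (PySem.List.enumerate rest j) cur acc = acc ++ pvTail p n rest j cur := by
  induction rest with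
  | nil => intro j cur acc; simp [PySem.List.enumerate, pvBuildA, pvTail]
  | cons part rest ih =>
      intro j cur acc
      rw [PySem.List.enumerate_cons]
      simp only [pvBuildA, pvTail, ih]
      simp [pvEntry]

-- B's comprehension equals the common recursion
theorem pvMapB_eq_tail (p : List Char) (P : List (List Char)) :
    ∀ (rest : List (List Char)) (k : Nat), P.drop k = rest →
      ((PySem.List.enumerate
          (rest.zip
            (((List.range P.length).map
                (fun i => '/' :: PySem.Chars.join ['/'] (P.take (i + 1)))).drop k)) (k : Int)).map
        (fun e =>
          (String.ofList e.2.1,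
           String.ofList (if (PySem.Chars.endswith p ['/'] || decide (e.1 < (P.length : Int) - 1)) &&
                         !(PySem.Chars.endswith e.2.2 ['/'])
                      then e.2.2 ++ ['/'] else e.2.2))))
      = pvTail p P.length rest (k : Int) (pvPref P k) := by
  intro rest
  induction rest with
  | nil => intro k _; simp [pvTail]
  | cons part rest ih =>
      intro k hd
      have hlt : k < P.length := by
        by_contra h
        rw [List.drop_eq_nil_iff.mpr (by omega)] at hd
        simp at hd
      have hPk : P[k] = part := by
        have h2 := List.drop_eq_getElem_cons hlt (l := P)
        rw [hd] at h2
        exact ((List.cons.injEq _ _ _ _).mp h2).1.symm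
      have hdr : P.drop (k + 1) = rest := by
        have h2 := List.drop_eq_getElem_cons hlt (l := P)
        rw [hd] at h2
        exact (((List.cons.injEq _ _ _ _).mp h2).2).symm
      have hrlen : k < ((List.range P.length).map
          (fun i => '/' :: PySem.Chars.join ['/'] (P.take (i + 1)))).length := by
        simpa using hlt
      rw [List.drop_eq_getElem_cons hrlen]
      simp only [List.getElem_map, List.getElem_range, List.zip_cons_cons,
        PySem.List.enumerate_cons, List.map_cons]
      have hpre := pvPrefix_eq P k hlt
      rw [hPk] at hpre
      have hcond : (decide ((k : Int) < (P.length : Int) - 1)) = !((k : Int) == (P.length : Int) - 1) := by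
        by_cases h : (k : Int) = (P.length : Int) - 1
        · simp [h]
        · have hlt2 : (k : Int) < (P.length : Int) - 1 := by omega
          simp [h, hlt2]
      have hnext : pvPref P (k + 1) = pvPref P k ++ '/' :: part := by
        simpa [pvPref] using hpre
      have ihs := ih (k + 1) hdr
      push_cast at ihs
      rw [hnext] at ihs
      simp only [pvTail, pvEntry, hpre, hcond]
      rw [ihs]

-- ===== VERDICT (by name: the statement is the Claim_ definition above) =====
theorem generate_breadcrumbs_spec : Claim_equal_generate_breadcrumbs := by
  intro path _
  unfold Spec_generate_breadcrumbs generate_breadcrumbs generate_breadcrumbs_alt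
  by_cases h0 : path.toList = [] ∨ path.toList = ['/']
  · rcases h0 with h | h
    · simp [String.toList_eq_nil_iff.mp h]
    · simp [h]
  · have hne : path.toList ≠ [] ∧ path.toList ≠ ['/'] := by
      constructor <;> intro h <;> exact h0 (by simp [h])
    have hp : (if PySem.Chars.startswith path.toList ['/'] then path.toList
               else '/' :: path.toList) ≠ ['/'] := by
      split
      · exact hne.2
      · intro h
        have : path.toList = [] := by
          cases hh : path.toList with
          | nil => rfl
          | cons a t => rw [hh] at h; cases h
        exact hne.1 this
    simp only [h0, if_false, if_neg hp]
    set p := if PySem.Chars.startswith path.toList ['/'] then path.toList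
             else '/' :: path.toList with hpdef
    set parts := PySem.Chars.splitOn (PySem.Chars.stripChars p ['/']) ['/'] with hparts
    have hA := pvBuildA_eq_tail p parts.length parts 0 [] [("/", "/")]
    have hB := pvMapB_eq_tail p parts parts 0 (by simp)
    simp only [List.drop_zero, Nat.cast_zero, pvPref] at hB
    rw [hA, hB]
    rfl
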